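-- pv_equiv track=rewrite | github.com/Lacxs/PH_Typhoon_Bot | processors/compute_eta.py | _get_tcws_for_port
-- ===== SOURCE A (Python) =====
-- def _get_tcws_for_port(port_name, tcws_data):
--     """
--     Determine TCWS level for a port based on area listings
--
--     Args:
--         port_name: Name of the port
--         tcws_data: Dict of {level: [areas]}
--
--     Returns:
--         TCWS level (1-5) or None
--     """
--     if not tcws_data:
--         return None
--
--     # Check each TCWS level (higher levels first)
--     for level in sorted(tcws_data.keys(), reverse=True):
--         areas = tcws_data[level]
--
--         # Check if port name or surrounding area is mentioned
--         for area in areas: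
--             area_lower = area.lower()
--             port_lower = port_name.lower()
--
--             # Direct match
--             if port_lower in area_lower:
--                 return level
--
--             # Province/region matching
--             # Manila -> Metro Manila, NCR
--             if port_lower == 'manila' and any(x in area_lower for x in ['metro manila', 'ncr', 'national capital']):
--                 return level
--
--             # Subic -> Zambales
--             if port_lower == 'subic' and 'zambales' in area_lower:
--                 return level
--
--             # Batangas -> Batangas province
--             if port_lower == 'batangas' and 'batangas' in area_lower:
--                 return level
--
--             # Iloilo -> Iloilo province/city
--             if port_lower == 'iloilo' and 'iloilo' in area_lower:
--                 return level
--
--             # Cagayan -> Cagayan province/valley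
--             if port_lower == 'cagayan' and 'cagayan' in area_lower:
--                 return level
--
--     return None
-- ===== SOURCE B (Python) =====
-- ALIASES = {
--     'manila': ['metro manila', 'ncr', 'national capital'],
--     'subic': ['zambales'],
-- }
--
--
-- def _get_tcws_for_port(port_name, tcws_data):
--     if not tcws_data:
--         return None
--     port_lower = port_name.lower()
--     patterns = [port_lower] + ALIASES.get(port_lower, [])
--     matching = [level for level, areas in tcws_data.items()
--                 if any(p in area.lower() for area in areas for p in patterns)]
--     return max(matching) if matching else None
-- ===== Notes on version B (the rewrite author's own statement) =====
-- stated objective: simpler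
-- what changed: B replaces the highest-first sorted scan with a single unsorted pass that collects every matching level and takes max(), folding the per-port special cases into an alias table queried once, so the pattern list is built once instead of re-testing the port-specific branches (and re-lowercasing the port name) for every area.
import Mathlib
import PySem

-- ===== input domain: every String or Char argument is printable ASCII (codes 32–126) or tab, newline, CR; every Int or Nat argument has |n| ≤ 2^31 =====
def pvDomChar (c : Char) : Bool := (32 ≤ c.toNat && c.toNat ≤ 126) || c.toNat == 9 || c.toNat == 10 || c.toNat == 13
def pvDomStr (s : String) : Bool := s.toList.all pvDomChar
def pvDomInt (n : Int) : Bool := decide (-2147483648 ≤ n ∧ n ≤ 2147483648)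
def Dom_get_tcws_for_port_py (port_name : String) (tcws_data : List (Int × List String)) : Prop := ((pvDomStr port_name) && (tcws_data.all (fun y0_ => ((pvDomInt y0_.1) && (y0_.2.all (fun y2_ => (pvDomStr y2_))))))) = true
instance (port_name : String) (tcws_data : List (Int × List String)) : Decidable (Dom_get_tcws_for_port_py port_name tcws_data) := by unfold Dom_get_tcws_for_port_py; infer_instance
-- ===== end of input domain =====

-- B collects all matching levels in one unsorted pass and returns their max, with the
-- per-port special cases folded into an alias table (simpler decomposition; same values).

-- ===== PORT A =====
-- A's chain of ifs inside the area loop: each branch returns `level`, so the first-match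
-- test for one area is their disjunction, in A's order.
def pvACond (port_lower area_lower : String) : Bool :=
  PySem.Str.isIn port_lower area_lower ||
  (port_lower == "manila" &&
    (["metro manila", "ncr", "national capital"].any (fun x => PySem.Str.isIn x area_lower))) ||
  (port_lower == "subic" && PySem.Str.isIn "zambales" area_lower) ||
  (port_lower == "batangas" && PySem.Str.isIn "batangas" area_lower) ||
  (port_lower == "iloilo" && PySem.Str.isIn "iloilo" area_lower) ||
  (port_lower == "cagayan" && PySem.Str.isIn "cagayan" area_lower)

-- the outer `for level in sorted(keys, reverse=True)` loop with its early return
def pvALoop (port_name : String) (d : PySem.Dict Int (List String)) : List Int → Option Int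
  | [] => none
  | level :: rest =>
    if (d.getD level []).any
        (fun area => pvACond (PySem.Str.lower port_name) (PySem.Str.lower area)) then
      some level
    else pvALoop port_name d rest

def get_tcws_for_port_py (port_name : String) (tcws_data : List (Int × List String)) : Option Int :=
  if tcws_data = [] then none
  else
    pvALoop port_name ⟨tcws_data⟩
      (PySem.List.sorted (PySem.Dict.keys (⟨tcws_data⟩ : PySem.Dict Int (List String))) (fun x => x) true)

-- ===== PORT B =====
def pvAliases : PySem.Dict String (List String) :=
  ⟨[("manila", ["metro manila", "ncr", "national capital"]), ("subic", ["zambales"])]⟩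

def get_tcws_for_port_py_alt (port_name : String) (tcws_data : List (Int × List String)) : Option Int :=
  if tcws_data = [] then none
  else
    let port_lower := PySem.Str.lower port_name
    let patterns := port_lower :: PySem.Dict.getD pvAliases port_lower []
    let matching :=
      ((⟨tcws_data⟩ : PySem.Dict Int (List String)).items.filter
        (fun p => p.2.any (fun area => patterns.any (fun q => PySem.Str.isIn q (PySem.Str.lower area))))).map
        (fun p => p.1)
    if matching = [] then none else PySem.List.max? matching (fun y => y)

-- ===== PRECONDITION & SPEC =====
-- Pre_ excludes association lists with duplicate keys — these cannot arise from a Python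
-- dict, and on them A's lookup-by-key vs B's item-iteration read different area lists.
def Pre_get_tcws_for_port_py (port_name : String) (tcws_data : List (Int × List String)) : Prop :=
  (tcws_data.map Prod.fst).Nodup
instance (port_name : String) (tcws_data : List (Int × List String)) : Decidable (Pre_get_tcws_for_port_py port_name tcws_data) := by unfold Pre_get_tcws_for_port_py; infer_instance

def pvWitness_get_tcws_for_port_py : String × (List (Int × List String)) :=
  ("manila", [(1, ["Metro Manila"]), (2, ["Ilocos Norte"])])

def Spec_get_tcws_for_port_py (port_name : String) (tcws_data : List (Int × List String)) (out : Option Int) : Prop := out = get_tcws_for_port_py_alt port_name tcws_data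
instance (port_name : String) (tcws_data : List (Int × List String)) (out : Option Int) : Decidable (Spec_get_tcws_for_port_py port_name tcws_data out) := by unfold Spec_get_tcws_for_port_py; infer_instance

-- ===== CLAIM (what is proved, stated in full; the proofs are below) =====
def Claim_equal_get_tcws_for_port_py : Prop := ∀ (port_name : String) (tcws_data : List (Int × List String)), Dom_get_tcws_for_port_py port_name tcws_data → Pre_get_tcws_for_port_py port_name tcws_data → Spec_get_tcws_for_port_py port_name tcws_data (get_tcws_for_port_py port_name tcws_data)

-- ===== LEMMAS AND PROOFS =====

-- A's disjunction of ifs equals B's any-pattern test, for every port string.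
theorem pvCond_eq (pl al : String) :
    pvACond pl al = (pl :: PySem.Dict.getD pvAliases pl []).any (fun q => PySem.Str.isIn q al) := by
  by_cases h1 : pl = "manila"
  · subst h1; simp [pvACond, pvAliases, PySem.Dict.getD, PySem.Dict.get?, List.any]
  · by_cases h2 : pl = "subic"
    · subst h2; simp [pvACond, pvAliases, PySem.Dict.getD, PySem.Dict.get?, List.any]
    · have e1 : (pl == "manila") = false := by simp [h1]
      have e2 : (pl == "subic") = false := by simp [h2]
      have e1' : ("manila" == pl) = false := by simp [Ne.symm h1]
      have e2' : ("subic" == pl) = false := by simp [Ne.symm h2]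
      have egd : PySem.Dict.getD pvAliases pl [] = [] := by
        simp [pvAliases, PySem.Dict.getD, PySem.Dict.get?, List.find?, e1', e2']
      by_cases h3 : pl = "batangas"
      · subst h3; simp [pvACond, egd, List.any]
      · by_cases h4 : pl = "iloilo"
        · subst h4; simp [pvACond, egd, List.any]
        · by_cases h5 : pl = "cagayan"
          · subst h5; simp [pvACond, egd, List.any]
          · have e3 : (pl == "batangas") = false := by simp [h3]
            have e4 : (pl == "iloilo") = false := by simp [h4]
            have e5 : (pl == "cagayan") = false := by simp [h5]
            simp [pvACond, egd, e1, e2, e3, e4, e5, List.any]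

theorem pvALoop_none_iff (pn : String) (d : PySem.Dict Int (List String)) (l : List Int) :
    pvALoop pn d l = none ↔
      ∀ k ∈ l, ((d.getD k []).any (fun area => pvACond (PySem.Str.lower pn) (PySem.Str.lower area))) = false := by
  induction l with
  | nil => simp [pvALoop]
  | cons h t ih =>
    by_cases hm : ((d.getD h []).any (fun area => pvACond (PySem.Str.lower pn) (PySem.Str.lower area))) = true
    · constructor
      · intro hc; simp [pvALoop, hm] at hc
      · intro hall
        exact absurd hm (by simp [hall h (List.mem_cons_self ..)])
    · have hm' : ((d.getD h []).any (fun area => pvACond (PySem.Str.lower pn) (PySem.Str.lower area))) = false :=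
        Bool.not_eq_true _ ▸ eq_false_of_ne_true hm
      constructor
      · intro hc k hk
        rcases List.mem_cons.mp hk with rfl | hk
        · exact hm'
        · simp only [pvALoop, hm', Bool.false_eq_true, if_false] at hc
          exact ih.mp hc k hk
      · intro hall
        simp only [pvALoop, hm', Bool.false_eq_true, if_false]
        exact ih.mpr (fun k hk => hall k (List.mem_cons_of_mem _ hk))

theorem pvALoop_some (pn : String) (d : PySem.Dict Int (List String)) (l : List Int) (k : Int)
    (hp : l.Pairwise (fun a b : Int => b ≤ a))
    (h : pvALoop pn d l = some k) :
    k ∈ l ∧ ((d.getD k []).any (fun area => pvACond (PySem.Str.lower pn) (PySem.Str.lower area))) = true ∧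
      ∀ j ∈ l, ((d.getD j []).any (fun area => pvACond (PySem.Str.lower pn) (PySem.Str.lower area))) = true → j ≤ k := by
  induction l with
  | nil => simp [pvALoop] at h
  | cons a t ih =>
    rcases List.pairwise_cons.mp hp with ⟨hle, hpt⟩
    by_cases hm : ((d.getD a []).any (fun area => pvACond (PySem.Str.lower pn) (PySem.Str.lower area))) = true
    · simp only [pvALoop, hm, if_pos] at h
      obtain rfl : a = k := by simpa using h
      exact ⟨List.mem_cons_self .., hm, by
        intro j hj _
        rcases List.mem_cons.mp hj with rfl | hj
        · exact le_refl j
        · exact hle j hj⟩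
    · simp only [pvALoop, hm] at h
      obtain ⟨hk, hky, hmax⟩ := ih hpt h
      refine ⟨List.mem_cons_of_mem _ hk, hky, ?_⟩
      intro j hj hjm
      rcases List.mem_cons.mp hj with rfl | hj
      · exact absurd hjm hm
      · exact hmax j hj hjm

-- B's filtered items project to the key list filtered by A's per-level test (needs Nodup keys).
theorem pvMatching_eq (pn : String) (tcws_data : List (Int × List String))
    (hnd : (tcws_data.map Prod.fst).Nodup) :
    ((⟨tcws_data⟩ : PySem.Dict Int (List String)).items.filter
        (fun p => p.2.any (fun area =>
          ((PySem.Str.lower pn :: PySem.Dict.getD pvAliases (PySem.Str.lower pn) []).any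
            (fun q => PySem.Str.isIn q (PySem.Str.lower area)))))).map (fun p => p.1)
      = (tcws_data.map Prod.fst).filter
          (fun k => ((⟨tcws_data⟩ : PySem.Dict Int (List String)).getD k []).any
            (fun area => pvACond (PySem.Str.lower pn) (PySem.Str.lower area))) := by
  have hitems : ((⟨tcws_data⟩ : PySem.Dict Int (List String)).items) = tcws_data := rfl
  rw [hitems, List.filter_map]
  congr 1
  apply List.filter_congr
  intro p hp
  have hget : ((⟨tcws_data⟩ : PySem.Dict Int (List String)).getD p.1 []) = p.2 := by
    apply PySem.Dict.getD_of_mem_items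
    · exact hp
    · exact hnd
  simp only [Function.comp, hget]
  apply PySem.List.any_congr_mem
  intro area _
  exact (pvCond_eq (PySem.Str.lower pn) (PySem.Str.lower area)).symm

-- ===== VERDICT (by name: the statement is the Claim_ definition above) =====
theorem get_tcws_for_port_py_spec : Claim_equal_get_tcws_for_port_py := by
  intro pn tcws_data _ hpre
  unfold Spec_get_tcws_for_port_py
  unfold get_tcws_for_port_py get_tcws_for_port_py_alt
  by_cases hnil : tcws_data = []
  · simp [hnil]
  · simp only [hnil, if_neg, not_false_eq_true]
    rw [pvMatching_eq pn tcws_data hpre]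
    set d : PySem.Dict Int (List String) := ⟨tcws_data⟩ with hd
    set P : Int → Bool := fun k =>
      ((d.getD k []).any (fun area => pvACond (PySem.Str.lower pn) (PySem.Str.lower area))) with hP
    have hkeys : PySem.Dict.keys d = tcws_data.map Prod.fst := rfl
    set S := PySem.List.sorted (PySem.Dict.keys d) (fun x => x) true with hS
    have hperm : S.Perm (tcws_data.map Prod.fst) := by
      rw [hS, hkeys]; exact PySem.List.sorted_perm _ _ _
    have hpw : S.Pairwise (fun a b : Int => b ≤ a) := by
      have := PySem.List.sorted_pairwise_rev (xs := PySem.Dict.keys d) (key := fun x : Int => x)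
      exact this
    cases hres : pvALoop pn d S with
    | none =>
      have hall := (pvALoop_none_iff pn d S).mp hres
      have hfil : (tcws_data.map Prod.fst).filter P = [] := by
        rw [List.filter_eq_nil_iff]
        intro k hk
        have := hall k (hperm.mem_iff.mpr hk)
        simp [hP, this]
      simp [hfil]
    | some k =>
      obtain ⟨hkmem, hkP, hmax⟩ := pvALoop_some pn d S k hpw hres
      have hkmem' : k ∈ (tcws_data.map Prod.fst).filter P := by
        rw [List.mem_filter]
        exact ⟨hperm.mem_iff.mp hkmem, hkP⟩
      have hne : (tcws_data.map Prod.fst).filter P ≠ [] := by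
        intro h; rw [h] at hkmem'; simp at hkmem'
      simp only [hne, if_neg, not_false_eq_true]
      cases hmx : PySem.List.max? ((tcws_data.map Prod.fst).filter P) (fun y => y) with
      | none =>
        rw [PySem.List.max?_eq_none_iff] at hmx
        exact absurd hmx hne
      | some m =>
        have hmmem := PySem.List.max?_mem hmx
        have hmmax := PySem.List.max?_isMax hmx
        have hmP : P m = true := (List.mem_filter.mp hmmem).2
        have hmkeys : m ∈ (tcws_data.map Prod.fst) := (List.mem_filter.mp hmmem).1
        have h1 : m ≤ k := hmax m (hperm.mem_iff.mpr hmkeys) hmP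
        have h2 : k ≤ m := hmmax k hkmem'
        have : k = m := le_antisymm h2 h1
        simp [this]
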